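-- pv_equiv track=rewrite | github.com/personal-algorithm-study/boj-java | programmers/python/level3/problem12938.py | solution
-- ===== SOURCE A (Python) =====
-- def solution(n, s):
--     if n > s:
--         return [-1]
--     share, remainder = divmod(s, n)
--     answer = [share for _ in range(n)]
--
--     for i in range(1, remainder + 1):
--         answer[-i] += 1
--     return answer
-- ===== SOURCE B (Python) =====
-- def solution(n, s):
--     if n > s:
--         return [-1]
--     # greedy: repeatedly give the next part the floor-average of what is left
--     answer = []
--     k, t = n, s
--     while k > 0:
--         part = t // k
--         answer.append(part)
--         k -= 1
--         t -= part
--     return answer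
-- ===== Notes on version B (the rewrite author's own statement) =====
-- stated objective: alternative
-- what changed: Replaces the divmod-based fill-then-increment-tail approach with a greedy single loop that repeatedly takes floor(t/k) for the next part and recurses on the remaining sum, never computing a remainder.
import Mathlib
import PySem

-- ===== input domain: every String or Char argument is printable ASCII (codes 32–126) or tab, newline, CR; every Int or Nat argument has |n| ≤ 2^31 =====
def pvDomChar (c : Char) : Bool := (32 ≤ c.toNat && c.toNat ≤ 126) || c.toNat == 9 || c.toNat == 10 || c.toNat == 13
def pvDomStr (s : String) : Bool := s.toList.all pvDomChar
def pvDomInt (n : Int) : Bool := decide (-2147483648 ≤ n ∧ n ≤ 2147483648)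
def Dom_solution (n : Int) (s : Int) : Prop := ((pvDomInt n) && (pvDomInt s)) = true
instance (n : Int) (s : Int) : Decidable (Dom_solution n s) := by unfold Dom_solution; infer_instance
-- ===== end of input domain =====

-- ===== PORT A =====
-- B changes: a single greedy loop (next part = floor(t/k) of what is left, no remainder)
-- instead of divmod plus a fill-then-increment-tail loop (objective: alternative).
def solution (n : Int) (s : Int) : List Int :=
  if n > s then [-1]
  else
    let share := PySem.Int.floordiv s n
    let rem := PySem.Int.mod s n
    let answer := (PySem.List.pyRange 0 n 1).map (fun _ => share)
    (PySem.List.pyRange 1 (rem + 1) 1).foldl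
      (fun acc i => PySem.List.pySetD acc (-i) (PySem.List.pyGetD acc (-i) 0 + 1)) answer

-- ===== PORT B =====
-- B's while loop: state (k, t, answer); appends t // k, then k -= 1, t -= part
def fillB (k : Int) (t : Int) (acc : List Int) : List Int :=
  if k ≤ 0 then acc
  else fillB (k - 1) (t - PySem.Int.floordiv t k) (acc ++ [PySem.Int.floordiv t k])
termination_by k.toNat
decreasing_by omega

def solution_alt (n : Int) (s : Int) : List Int :=
  if n > s then [-1]
  else fillB n s []

-- ===== PRECONDITION & SPEC =====
-- Pre_ excludes only n = 0 with 0 <= s, where A's divmod(s, 0) raises ZeroDivisionError.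
def Pre_solution (n : Int) (s : Int) : Prop := n ≠ 0 ∨ s < 0
instance (n : Int) (s : Int) : Decidable (Pre_solution n s) := by unfold Pre_solution; infer_instance
def pvWitness_solution : Int × Int := (3, 11)
def Spec_solution (n : Int) (s : Int) (out : List Int) : Prop := out = solution_alt n s
instance (n : Int) (s : Int) (out : List Int) : Decidable (Spec_solution n s out) := by unfold Spec_solution; infer_instance

-- ===== CLAIM (what is proved, stated in full; the proofs are below) =====
def Claim_equal_solution : Prop := ∀ (n : Int) (s : Int), Dom_solution n s → Pre_solution n s → Spec_solution n s (solution n s)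

-- ===== LEMMAS AND PROOFS =====

lemma pySetD_neg (xs : List Int) (k : Nat) (v : Int) (h1 : 0 < k) (h2 : k ≤ xs.length) :
    PySem.List.pySetD xs (-(k:Int)) v = xs.set (xs.length - k) v := by
  simp [PySem.List.pySetD, PySem.List.pySet?, PySem.List.pyIdx?, Nat.pos_iff_ne_zero.mp h1, h2]

-- A's increment loop on a replicate list turns the last k elements into share + 1
lemma loop_replicate (share : Int) (m : Nat) :
    ∀ k : Nat, k ≤ m →
      (PySem.List.pyRange 1 ((k : Int) + 1) 1).foldl
        (fun acc i => PySem.List.pySetD acc (-i) (PySem.List.pyGetD acc (-i) 0 + 1))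
        (List.replicate m share)
      = List.replicate (m - k) share ++ List.replicate k (share + 1) := by
  intro k
  induction k with
  | zero => intro _; simp [PySem.List.pyRange_one_eq_nil]
  | succ k ih =>
    intro hk
    have hk' : k ≤ m := Nat.le_of_succ_le hk
    have hcast : ((k + 1 : Nat) : Int) + 1 = ((k : Int) + 1) + 1 := by push_cast; ring
    rw [hcast, PySem.List.pyRange_one_succ_right (by omega), List.foldl_append, ih hk']
    have hcast2 : ((k : Int) + 1) = ((k + 1 : Nat) : Int) := by push_cast; ring
    have hget : PySem.List.pyGetD
        (List.replicate (m - k) share ++ List.replicate k (share + 1)) (-((k + 1 : Nat) : Int)) 0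
        = share := by
      rw [PySem.List.pyGetD_neg_natCast _ _ _ (by omega) (by simp; omega)]
      rw [List.getElem_append_left (by simp; omega)]
      simp
    simp only [List.foldl_cons, List.foldl_nil, hcast2, hget]
    rw [pySetD_neg _ _ _ (by omega) (by simp; omega)]
    have hlen : (List.replicate (m - k) share ++ List.replicate k (share + 1)).length = m := by
      simp; omega
    rw [hlen]
    apply List.ext_getElem
    · simp; omega
    · intro i h1 h2
      simp only [List.getElem_set]
      by_cases hi : i < m - (k + 1)
      · rw [if_neg (by omega)]
        rw [List.getElem_append_left (by simp; omega),
            List.getElem_append_left (by simp; omega)]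
        simp
      · by_cases hi2 : i = m - (k + 1)
        · rw [if_pos (by omega)]
          rw [List.getElem_append_right (by simp; omega)]
          simp
        · rw [if_neg (by omega)]
          rw [List.getElem_append_right (by simp; omega),
              List.getElem_append_right (by simp; omega)]
          simp

-- B's greedy recursion produces the same two-block shape
lemma fillB_blocks : ∀ m : Nat, ∀ k t : Int, ∀ acc : List Int, k.toNat = m → 0 < k →
    fillB k t acc = acc ++ (List.replicate (k - PySem.Int.mod t k).toNat (PySem.Int.floordiv t k)
        ++ List.replicate (PySem.Int.mod t k).toNat (PySem.Int.floordiv t k + 1)) := by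
  intro m
  induction m with
  | zero => intro k t acc hm hk; exfalso; omega
  | succ m ih =>
    intro k t acc hm hk
    set q := PySem.Int.floordiv t k with hq
    set r := PySem.Int.mod t k with hr
    have hqr : q * k + r = t := PySem.Int.floordiv_mul_add_mod t k
    have hr0 : 0 ≤ r := PySem.Int.mod_nonneg t hk
    have hrk : r < k := PySem.Int.mod_lt t hk
    rw [fillB, if_neg (by omega)]
    by_cases hk1 : k = 1
    · subst hk1
      have hre : r = 0 := by omega
      rw [fillB, if_pos (by omega)]
      simp [hre]
      omega
    · -- k - 1 > 0
      have hk' : (0:Int) < k - 1 := by omega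
      have ht' : t - q = q * (k - 1) + r := by ring_nf; omega
      by_cases hrc : r < k - 1
      · have hq' : PySem.Int.floordiv (t - q) (k - 1) = q := by
          rw [PySem.Int.floordiv_eq_iff_of_pos hk']
          constructor <;> nlinarith
        have hr' : PySem.Int.mod (t - q) (k - 1) = r := by
          have := PySem.Int.floordiv_mul_add_mod (t - q) (k - 1)
          rw [hq'] at this; omega
        rw [ih (k - 1) (t - q) (acc ++ [q]) (by omega) hk', hq', hr']
        have : (k - r).toNat = (k - 1 - r).toNat + 1 := by omega
        rw [this, List.replicate_succ]
        simp
      · have hre : r = k - 1 := by omega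
        have hq' : PySem.Int.floordiv (t - q) (k - 1) = q + 1 := by
          rw [PySem.Int.floordiv_eq_iff_of_pos hk']
          constructor <;> nlinarith
        have hr' : PySem.Int.mod (t - q) (k - 1) = 0 := by
          have := PySem.Int.floordiv_mul_add_mod (t - q) (k - 1)
          rw [hq'] at this; nlinarith
        rw [ih (k - 1) (t - q) (acc ++ [q]) (by omega) hk', hq', hr']
        have h1 : (k - r).toNat = 1 := by omega
        have h2 : (k - 1 - (0:Int)).toNat = r.toNat := by omega
        rw [h1, h2]
        simp

-- ===== VERDICT (by name: the statement is the Claim_ definition above) =====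
theorem solution_spec : Claim_equal_solution := by
  intro n s hdom hpre
  unfold Spec_solution solution solution_alt
  by_cases hgt : n > s
  · simp [hgt]
  · simp only [if_neg hgt]
    have hns : n ≤ s := not_lt.mp hgt
    have hn0 : n ≠ 0 := by
      rcases hpre with h | h
      · exact h
      · intro h0; omega
    set share := PySem.Int.floordiv s n with hsh
    set rem := PySem.Int.mod s n with hrem
    rcases lt_or_gt_of_ne hn0 with hneg | hpos
    · -- n < 0 : empty answer on both sides
      have hb := PySem.Int.mod_neg_bounds s hneg
      rw [PySem.List.pyRange_one_eq_nil (a := 0) (by omega),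
          PySem.List.pyRange_one_eq_nil (a := 1) (by omega)]
      rw [fillB, if_pos (by omega)]
      simp
    · -- n > 0
      have hr0 : 0 ≤ rem := PySem.Int.mod_nonneg s hpos
      have hrlt : rem < n := PySem.Int.mod_lt s hpos
      have hminit : (PySem.List.pyRange 0 n 1).map (fun _ => share)
          = List.replicate n.toNat share := by
        rw [List.map_const']
        rw [PySem.List.length_pyRange_one]
        norm_num
      rw [hminit]
      have hcast : rem + 1 = ((rem.toNat : Nat) : Int) + 1 := by omega
      rw [hcast, loop_replicate share n.toNat rem.toNat (by omega)]
      rw [fillB_blocks n.toNat n s [] rfl hpos, ← hsh, ← hrem]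
      have h3 : (n - rem).toNat = n.toNat - rem.toNat := by omega
      rw [h3, List.nil_append]
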